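-- pv_equiv track=rewrite | github.com/sheikhburhan05/intra-care | src/services/huddle_pdf_exporter.py | _merge_word_segments
-- ===== SOURCE A (Python) =====
-- def _merge_word_segments(words: list[tuple[str, bool]]) -> list[tuple[str, bool]]:
--     """Join consecutive same-bold words with spaces into single segments."""
--     if not words:
--         return []
--     result: list[tuple[str, bool]] = []
--     cur_text, cur_bold = words[0]
--     for word, bold in words[1:]:
--         if bold == cur_bold:
--             cur_text += " " + word
--         else:
--             result.append((cur_text, cur_bold))
--             cur_text, cur_bold = word, bold
--     result.append((cur_text, cur_bold))
--     return result
-- ===== SOURCE B (Python) =====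
-- def _merge_word_segments(words: list[tuple[str, bool]]) -> list[tuple[str, bool]]:
--     """Join consecutive same-bold words with spaces into single segments.
--
--     Group-then-join decomposition: repeatedly find the maximal prefix run of
--     equal bold flag, emit it as one space-joined segment, and recurse on the rest.
--     """
--     segments: list[tuple[str, bool]] = []
--     rest = words
--     while rest:
--         bold = rest[0][1]
--         k = 1
--         while k < len(rest) and rest[k][1] == bold:
--             k += 1
--         segments.append((" ".join(w for w, _ in rest[:k]), bold))
--         rest = rest[k:]
--     return segments
-- ===== Notes on version B (the rewrite author's own statement) =====
-- stated objective: alternative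
-- what changed: Replaced A's running-accumulator compare-and-flush loop (string grown word by word, flushed on flag change) with a group-then-join decomposition: take the maximal prefix run of equal bold flag, emit ' '.join of its words as one segment, recurse on the remainder.
import Mathlib
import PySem

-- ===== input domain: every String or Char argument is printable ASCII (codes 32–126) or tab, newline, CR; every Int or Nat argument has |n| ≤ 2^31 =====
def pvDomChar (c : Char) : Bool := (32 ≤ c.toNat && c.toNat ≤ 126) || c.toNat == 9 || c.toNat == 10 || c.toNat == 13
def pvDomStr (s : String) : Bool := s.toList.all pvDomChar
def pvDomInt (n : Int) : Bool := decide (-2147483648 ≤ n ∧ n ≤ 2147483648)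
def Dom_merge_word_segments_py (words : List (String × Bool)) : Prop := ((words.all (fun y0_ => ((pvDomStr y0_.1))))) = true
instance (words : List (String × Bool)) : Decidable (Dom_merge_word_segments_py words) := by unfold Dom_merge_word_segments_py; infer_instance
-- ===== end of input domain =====

-- B replaces A's running-accumulator compare-and-flush loop with a group-then-join
-- decomposition (maximal run of equal bold flag, then a single space-join); no speed claim.

-- ===== PORT A =====
-- A: state (result, cur_text, cur_bold), folded over words[1:], flushed at the end.
def merge_word_segments_py (words : List (String × Bool)) : List (String × Bool) :=
  match words with
  | [] => []
  | (w0, b0) :: rest =>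
    let s := rest.foldl
      (fun (st : List (String × Bool) × String × Bool) p =>
        if p.2 == st.2.2 then (st.1, st.2.1 ++ " " ++ p.1, st.2.2)
        else (st.1 ++ [(st.2.1, st.2.2)], p.1, p.2))
      ([], w0, b0)
    s.1 ++ [s.2]

-- ===== PORT B =====
-- B: emit the maximal prefix run of equal bold flag as one joined segment, recurse on the rest.
def merge_word_segments_py_alt (words : List (String × Bool)) : List (String × Bool) :=
  match words with
  | [] => []
  | (w, b) :: rest =>
    (PySem.Str.join " " (w :: (rest.takeWhile (fun p => p.2 == b)).map Prod.fst), b)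
      :: merge_word_segments_py_alt (rest.dropWhile (fun p => p.2 == b))
termination_by words.length
decreasing_by
  simpa using Nat.lt_succ_of_le (List.length_dropWhile_le _ _)

-- ===== PRECONDITION & SPEC =====
def Spec_merge_word_segments_py (words : List (String × Bool)) (out : List (String × Bool)) : Prop := out = merge_word_segments_py_alt words
instance (words : List (String × Bool)) (out : List (String × Bool)) : Decidable (Spec_merge_word_segments_py words out) := by unfold Spec_merge_word_segments_py; infer_instance

-- ===== CLAIM (what is proved, stated in full; the proofs are below) =====
def Claim_equal_merge_word_segments_py : Prop := ∀ (words : List (String × Bool)), Dom_merge_word_segments_py words → Spec_merge_word_segments_py words (merge_word_segments_py words)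

-- ===== LEMMAS AND PROOFS =====

-- A's loop rewritten as a structural recursion on the remaining words.
def mwsGo (cur : String) (b : Bool) : List (String × Bool) → List (String × Bool)
  | [] => [(cur, b)]
  | (w, b') :: rest =>
    if b' == b then mwsGo (cur ++ " " ++ w) b rest
    else (cur, b) :: mwsGo w b' rest

theorem mws_foldl_eq_go (rest : List (String × Bool)) (res : List (String × Bool))
    (cur : String) (b : Bool) :
    (let s := rest.foldl
      (fun (st : List (String × Bool) × String × Bool) p =>
        if p.2 == st.2.2 then (st.1, st.2.1 ++ " " ++ p.1, st.2.2)
        else (st.1 ++ [(st.2.1, st.2.2)], p.1, p.2))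
      (res, cur, b)
     s.1 ++ [s.2]) = res ++ mwsGo cur b rest := by
  induction rest generalizing res cur b with
  | nil => simp [mwsGo]
  | cons p rest ih =>
    obtain ⟨w, b'⟩ := p
    by_cases h : b' = b
    · simp only [List.foldl_cons, mwsGo]
      rw [if_pos (by simp [h]), if_pos (by simp [h])]
      exact ih res (cur ++ " " ++ w) b
    · simp only [List.foldl_cons, mwsGo]
      rw [if_neg (by simp [h]), if_neg (by simp [h])]
      rw [ih]
      simp

-- joining one more word into the front piece
theorem join_absorb (cur w : String) (l : List String) :
    PySem.Str.join " " (cur :: w :: l) = PySem.Str.join " " ((cur ++ " " ++ w) :: l) := by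
  apply String.toList_injective
  cases l with
  | nil =>
    simp [PySem.Str.toList_join, PySem.Chars.join_cons_cons, PySem.Chars.join_singleton]
  | cons x xs =>
    simp [PySem.Str.toList_join, PySem.Chars.join_cons_cons]

theorem join_single (cur : String) : PySem.Str.join " " [cur] = cur := by
  apply String.toList_injective
  simp [PySem.Str.toList_join, PySem.Chars.join_singleton]

theorem alt_nil : merge_word_segments_py_alt [] = [] := by
  rw [merge_word_segments_py_alt.eq_def]

theorem mwsGo_eq_alt (rest : List (String × Bool)) (cur : String) (b : Bool) :
    mwsGo cur b rest = merge_word_segments_py_alt ((cur, b) :: rest) := by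
  induction rest generalizing cur b with
  | nil =>
    rw [mwsGo, merge_word_segments_py_alt.eq_def]
    simp [join_single, alt_nil]
  | cons p rest ih =>
    obtain ⟨w, b'⟩ := p
    by_cases h : b' = b
    · rw [mwsGo, if_pos (by simp [h]), ih]
      rw [merge_word_segments_py_alt.eq_def, merge_word_segments_py_alt.eq_def]
      simp [h, join_absorb]
    · rw [mwsGo, if_neg (by simp [h]), ih]
      conv_rhs => rw [merge_word_segments_py_alt.eq_def]
      simp [h, join_single]

-- ===== VERDICT (by name: the statement is the Claim_ definition above) =====
theorem merge_word_segments_py_spec : Claim_equal_merge_word_segments_py := by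
  intro words _
  unfold Spec_merge_word_segments_py
  match words with
  | [] => exact alt_nil.symm
  | (w0, b0) :: rest =>
    show merge_word_segments_py ((w0, b0) :: rest) = _
    rw [show merge_word_segments_py ((w0, b0) :: rest) =
        [] ++ mwsGo w0 b0 rest from mws_foldl_eq_go rest [] w0 b0]
    rw [mwsGo_eq_alt]
    simp
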